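-- pv_equiv track=rewrite | github.com/VladimirMonin/MD-to-HTML | md_converter/preprocessors/mermaid_preprocessor.py | _escape_quotes_in_strings
-- ===== SOURCE A (Python) =====
-- def _escape_quotes_in_strings(text: str) -> str:
--     """
--     Экранирует одинарные кавычки внутри строк в двойных кавычках.
--     Для classDiagram note директив типа: note for X "Text with 'quotes'"
--     Заменяет ' на временный маркер ___APOS___, который будет заменен на &#39;
--     в постпроцессоре (после html.unescape).
--     """
--     result = []
--     i = 0
--     while i < len(text):
--         if text[i] == '"':
--             # Нашли начало строки в двойных кавычках
--             result.append('"')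
--             i += 1
--             # Ищем закрывающую кавычку
--             while i < len(text) and text[i] != '"':
--                 if text[i] == "'":
--                     # Заменяем одинарную кавычку на временный маркер
--                     result.append("___APOS___")
--                 else:
--                     result.append(text[i])
--                 i += 1
--             if i < len(text):
--                 result.append('"')
--                 i += 1
--         else:
--             result.append(text[i])
--             i += 1
--     return "".join(result)
-- ===== SOURCE B (Python) =====
-- def _escape_quotes_in_strings(text: str) -> str:
--     parts = text.split('"')
--     return '"'.join(
--         part if i % 2 == 0 else part.replace("'", "___APOS___")
--         for i, part in enumerate(parts)
--     )
-- ===== Notes on version B (the rewrite author's own statement) =====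
-- stated objective: idiomatic
-- what changed: Replaced the hand-written index-based scanner with nested while loops by splitting on the double-quote character, escaping the odd (inside-quotes) segments with str.replace, and rejoining.
import Mathlib
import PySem

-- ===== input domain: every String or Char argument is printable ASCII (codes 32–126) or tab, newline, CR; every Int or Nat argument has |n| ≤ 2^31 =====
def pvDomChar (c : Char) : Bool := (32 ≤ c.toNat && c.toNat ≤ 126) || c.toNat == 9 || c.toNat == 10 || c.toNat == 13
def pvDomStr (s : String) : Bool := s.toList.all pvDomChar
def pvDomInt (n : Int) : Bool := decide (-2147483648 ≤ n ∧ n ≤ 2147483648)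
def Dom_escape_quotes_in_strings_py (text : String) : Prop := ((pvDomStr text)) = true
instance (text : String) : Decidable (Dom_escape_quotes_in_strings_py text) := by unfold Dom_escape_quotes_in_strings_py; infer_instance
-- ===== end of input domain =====

-- B replaces A's index-based nested-while character scanner by split('"') / escape the odd
-- (inside-quotes) segments with replace / rejoin with '"' — idiomatic, same return value.

-- ===== PORT A =====
mutual
-- A's outer while loop (outside double quotes); each append contributes its characters to result.
def pvAOuter : List Char → List Char
  | [] => []
  | c :: rest => if c = '"' then '"' :: pvAInner rest else c :: pvAOuter rest
-- A's inner while loop (inside double quotes, until the closing '"' or end of text).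
def pvAInner : List Char → List Char
  | [] => []
  | c :: rest =>
      if c = '"' then '"' :: pvAOuter rest
      else if c = '\'' then "___APOS___".toList ++ pvAInner rest
      else c :: pvAInner rest
end

def escape_quotes_in_strings_py (text : String) : String :=
  String.mk (pvAOuter text.toList)

-- ===== PORT B =====
def escape_quotes_in_strings_py_alt (text : String) : String :=
  let parts := PySem.Chars.splitOn text.toList ['"']          -- text.split('"')
  let escaped := (PySem.List.enumerate parts).map
    (fun ip => if PySem.Int.mod ip.1 2 = 0 then ip.2
               else PySem.Chars.replace ip.2 ['\''] "___APOS___".toList)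
  String.mk (PySem.Chars.join ['"'] escaped)                  -- '"'.join(...)

-- ===== PRECONDITION & SPEC =====
def Spec_escape_quotes_in_strings_py (text : String) (out : String) : Prop := out = escape_quotes_in_strings_py_alt text
instance (text : String) (out : String) : Decidable (Spec_escape_quotes_in_strings_py text out) := by unfold Spec_escape_quotes_in_strings_py; infer_instance

-- ===== CLAIM (what is proved, stated in full; the proofs are below) =====
def Claim_equal_escape_quotes_in_strings_py : Prop := ∀ (text : String), Dom_escape_quotes_in_strings_py text → Spec_escape_quotes_in_strings_py text (escape_quotes_in_strings_py text)

-- ===== LEMMAS AND PROOFS =====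

-- structural model of text.split('"')
def pvSplit : List Char → List (List Char)
  | [] => [[]]
  | c :: cs => if c = '"' then [] :: pvSplit cs else (pvSplit cs).modifyHead (c :: ·)

-- structural model of seg.replace("'", "___APOS___")
def pvRep : List Char → List Char
  | [] => []
  | c :: cs => (if c = '\'' then "___APOS___".toList else [c]) ++ pvRep cs

-- structural model of the enumerate-parity map: escape the odd-position segments
def pvAlt : Bool → List (List Char) → List (List Char)
  | _, [] => []
  | b, p :: ps => (if b then pvRep p else p) :: pvAlt (!b) ps

lemma pvSplit_ne_nil (cs : List Char) : pvSplit cs ≠ [] := by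
  cases cs with
  | nil => simp [pvSplit]
  | cons c cs =>
    simp only [pvSplit]
    split
    · simp
    · cases h : pvSplit cs with
      | nil => exact absurd h (pvSplit_ne_nil cs)
      | cons p ps => simp

lemma pvSplitOn_go' (l : List Char) : ∀ (fuel : Nat) (cur : List Char) (acc : List (List Char)),
    l.length ≤ fuel →
    PySem.Chars.splitOn.go ['"'] fuel l cur acc = acc.reverse ++ (pvSplit l).modifyHead (cur.reverse ++ ·) := by
  induction l with
  | nil =>
    intro fuel cur acc _
    cases fuel <;> simp [PySem.Chars.splitOn.go, pvSplit]
  | cons c rest ih =>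
    intro fuel cur acc h
    cases fuel with
    | zero => simp at h
    | succ f =>
      simp only [PySem.Chars.splitOn.go]
      by_cases hc : c = '"'
      · have hp : List.isPrefixOf ['"'] (c :: rest) = true := by simp [List.isPrefixOf, hc]
        rw [if_pos hp]
        simp only [List.length_cons, List.length_nil, List.drop_succ_cons, List.drop_zero] at *
        rw [ih f [] (cur.reverse :: acc) (by omega)]
        subst hc
        cases hs : pvSplit rest with
        | nil => exact absurd hs (pvSplit_ne_nil rest)
        | cons p ps => simp [pvSplit, hs]
      · have hp : List.isPrefixOf ['"'] (c :: rest) = false := by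
          simp [List.isPrefixOf]; exact fun h' => absurd h'.symm hc
        rw [if_neg (by simp [hp])]
        simp only [List.length_cons] at h
        rw [ih f (c :: cur) acc (by omega)]
        cases hs : pvSplit rest with
        | nil => exact absurd hs (pvSplit_ne_nil rest)
        | cons p ps => simp [pvSplit, hs, hc]

lemma pvSplitOn_eq (cs : List Char) : PySem.Chars.splitOn cs ['"'] = pvSplit cs := by
  rw [PySem.Chars.splitOn, pvSplitOn_go' cs (cs.length + 1) [] [] (by omega)]
  cases hs : pvSplit cs with
  | nil => exact absurd hs (pvSplit_ne_nil cs)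
  | cons p ps => simp

lemma pvReplace_go (l : List Char) : ∀ (fuel : Nat) (acc : List Char),
    l.length ≤ fuel →
    PySem.Chars.replace.go ['\''] "___APOS___".toList fuel l acc = acc.reverse ++ pvRep l := by
  induction l with
  | nil => intro fuel acc _; cases fuel <;> simp [PySem.Chars.replace.go, pvRep]
  | cons c rest ih =>
    intro fuel acc h
    cases fuel with
    | zero => simp at h
    | succ f =>
      simp only [PySem.Chars.replace.go]
      simp only [List.length_cons] at h
      by_cases hc : c = '\''
      · have hp : List.isPrefixOf ['\''] (c :: rest) = true := by simp [List.isPrefixOf, hc]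
        rw [if_pos hp]
        simp only [List.length_cons, List.length_nil, List.drop_succ_cons, List.drop_zero]
        rw [ih f _ (by omega)]
        simp [pvRep, hc]
      · have hp : List.isPrefixOf ['\''] (c :: rest) = false := by
          simp [List.isPrefixOf]; exact fun h' => absurd h'.symm hc
        rw [if_neg (by simp [hp])]
        rw [ih f _ (by omega)]
        simp [pvRep, hc]

lemma pvReplace_eq (s : List Char) :
    PySem.Chars.replace s ['\''] "___APOS___".toList = pvRep s := by
  rw [PySem.Chars.replace]
  simp only [List.isEmpty_cons]
  exact pvReplace_go s s.length [] (le_refl _)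

lemma pvEnumMap (ps : List (List Char)) : ∀ (k : Nat),
    (PySem.List.enumerate ps (k : Int)).map
      (fun ip => if PySem.Int.mod ip.1 2 = 0 then ip.2
                 else PySem.Chars.replace ip.2 ['\''] "___APOS___".toList)
      = pvAlt (decide (k % 2 = 1)) ps := by
  induction ps with
  | nil => intro k; simp [PySem.List.enumerate_nil, pvAlt]
  | cons p ps ih =>
    intro k
    rw [PySem.List.enumerate_cons]
    have hk1 : (k : Int) + 1 = ((k + 1 : Nat) : Int) := by push_cast; ring
    simp only [List.map_cons, hk1, ih (k + 1)]
    have hmod : PySem.Int.mod (k : Int) 2 = ((k % 2 : Nat) : Int) :=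
      PySem.Int.mod_natCast k 2
    rcases Nat.even_or_odd k with he | ho
    · have h0 : k % 2 = 0 := Nat.even_iff.mp he
      have h1 : (k + 1) % 2 = 1 := by omega
      rw [hmod, h0]
      simp [pvAlt, h1]
    · have h0 : k % 2 = 1 := Nat.odd_iff.mp ho
      have h1 : (k + 1) % 2 = 0 := by omega
      rw [hmod, h0]
      simp [pvAlt, h1]
      exact pvReplace_eq p

lemma pvMain (cs : List Char) :
    pvAOuter cs = PySem.Chars.join ['"'] (pvAlt false (pvSplit cs))
      ∧ pvAInner cs = PySem.Chars.join ['"'] (pvAlt true (pvSplit cs)) := by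
  induction cs with
  | nil =>
    constructor <;>
      simp [pvAOuter, pvAInner, pvSplit, pvAlt, PySem.Chars.join_singleton, pvRep]
  | cons c rest ih =>
    obtain ⟨iho, ihi⟩ := ih
    cases hs : pvSplit rest with
    | nil => exact absurd hs (pvSplit_ne_nil rest)
    | cons p ps =>
      by_cases hc : c = '"'
      · subst hc
        have hsplit : pvSplit ('"' :: rest) = [] :: p :: ps := by simp [pvSplit, hs]
        constructor
        · rw [pvAOuter, if_pos rfl, ihi, hs, hsplit]
          simp [pvAlt, PySem.Chars.join_cons_cons]
        · rw [pvAInner, if_pos rfl, iho, hs, hsplit]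
          simp [pvAlt, pvRep, PySem.Chars.join_cons_cons]
      · have hsplit : pvSplit (c :: rest) = (c :: p) :: ps := by simp [pvSplit, hc, hs]
        constructor
        · rw [pvAOuter, if_neg hc, iho, hs, hsplit]
          cases ps <;>
            simp [pvAlt, PySem.Chars.join_cons_cons, PySem.Chars.join_singleton]
        · rw [pvAInner, if_neg hc, ihi, hs, hsplit]
          by_cases hq : c = '\''
          · subst hq
            cases ps <;>
              simp [pvAlt, pvRep, PySem.Chars.join_cons_cons, PySem.Chars.join_singleton]
          · rw [if_neg hq]
            cases ps <;>
              simp [pvAlt, pvRep, hq, PySem.Chars.join_cons_cons, PySem.Chars.join_singleton]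

-- ===== VERDICT (by name: the statement is the Claim_ definition above) =====
theorem escape_quotes_in_strings_py_spec : Claim_equal_escape_quotes_in_strings_py := by
  intro text _
  unfold Spec_escape_quotes_in_strings_py escape_quotes_in_strings_py escape_quotes_in_strings_py_alt
  have h : (PySem.List.enumerate (pvSplit text.toList)).map
      (fun ip => if PySem.Int.mod ip.1 2 = 0 then ip.2
                 else PySem.Chars.replace ip.2 ['\''] "___APOS___".toList)
      = pvAlt false (pvSplit text.toList) := pvEnumMap (pvSplit text.toList) 0
  rw [pvSplitOn_eq]
  dsimp only
  rw [h, (pvMain text.toList).1]
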